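-- pv_equiv track=rewrite | github.com/custodiaserrana-lab/Sistema-de-Apuestas-deportivas | bot_telegram.py | buscar_rating
-- ===== SOURCE A (Python) =====
-- def normalizar(nombre):
--     reemplazos = {
--         "FC": "", "CF": "", "AC": "", "SC": "", "AS": "",
--         "United": "Utd", "Athletic Club": "Athletic Bilbao",
--         "Internazionale": "Inter", "Hellas Verona": "Verona",
--     }
--     nombre = nombre.strip()
--     for k, v in reemplazos.items():
--         nombre = nombre.replace(k, v)
--     return nombre.strip().lower()
--
-- def buscar_rating(nombre, ratings):
--     n = normalizar(nombre)
--     for eq, r in ratings.items():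
--         if normalizar(eq) == n:
--             return r
--     for eq, r in ratings.items():
--         if n in normalizar(eq) or normalizar(eq) in n:
--             return r
--     return None
-- ===== SOURCE B (Python) =====
-- def normalizar(nombre):
--     reemplazos = {
--         "FC": "", "CF": "", "AC": "", "SC": "", "AS": "",
--         "United": "Utd", "Athletic Club": "Athletic Bilbao",
--         "Internazionale": "Inter", "Hellas Verona": "Verona",
--     }
--     nombre = nombre.strip()
--     for k, v in reemplazos.items():
--         nombre = nombre.replace(k, v)
--     return nombre.strip().lower()
--
-- def buscar_rating(nombre, ratings):
--     n = normalizar(nombre)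
--     cand = None
--     for eq, r in ratings.items():
--         m = normalizar(eq)
--         if m == n:
--             return r
--         if cand is None and (n in m or m in n):
--             cand = r
--     return cand
-- ===== Notes on version B (the rewrite author's own statement) =====
-- stated objective: alternative
-- what changed: Collapses A's two sequential scans (exact pass, then substring pass) into a single pass that normalizes each key once, returns immediately on an exact match, and remembers the first substring candidate to return after the loop.
import Mathlib
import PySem

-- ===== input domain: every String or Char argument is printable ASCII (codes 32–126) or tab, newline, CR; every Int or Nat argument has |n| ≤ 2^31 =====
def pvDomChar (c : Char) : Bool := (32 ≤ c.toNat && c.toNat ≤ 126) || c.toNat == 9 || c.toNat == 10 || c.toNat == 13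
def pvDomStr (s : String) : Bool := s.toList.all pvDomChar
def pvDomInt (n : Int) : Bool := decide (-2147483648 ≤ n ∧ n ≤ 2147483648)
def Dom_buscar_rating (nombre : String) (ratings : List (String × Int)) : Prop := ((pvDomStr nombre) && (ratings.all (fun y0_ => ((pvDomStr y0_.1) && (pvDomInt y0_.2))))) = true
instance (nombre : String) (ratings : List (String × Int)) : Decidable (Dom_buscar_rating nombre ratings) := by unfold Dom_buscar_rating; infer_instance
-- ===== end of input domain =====

-- B replaces A's two sequential scans by one pass that normalizes each key once,
-- returning on an exact match and remembering the first substring candidate (objective: alternative decomposition).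
-- 'ratings' is a Python dict, modelled as PySem.Dict built from the association list.

-- shared helper: normalizar, a literal transliteration of the Python helper used by both versions
def normalizar (nombre : String) : String :=
  let reemplazos : List (String × String) :=
    [("FC", ""), ("CF", ""), ("AC", ""), ("SC", ""), ("AS", ""),
     ("United", "Utd"), ("Athletic Club", "Athletic Bilbao"),
     ("Internazionale", "Inter"), ("Hellas Verona", "Verona")]
  let n := PySem.Str.strip nombre
  let n := reemplazos.foldl (fun s kv => PySem.Str.replace s kv.1 kv.2) n
  PySem.Str.lower (PySem.Str.strip n)

-- ===== PORT A =====
-- first loop of A: exact match on the normalized name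
def buscarExact (n : String) : List (String × Int) → Option Int
  | [] => none
  | (eq, r) :: rest => if normalizar eq = n then some r else buscarExact n rest

-- second loop of A: substring match either way
def buscarSub (n : String) : List (String × Int) → Option Int
  | [] => none
  | (eq, r) :: rest =>
      if PySem.Str.isIn n (normalizar eq) || PySem.Str.isIn (normalizar eq) n then some r
      else buscarSub n rest

def buscar_rating (nombre : String) (ratings : List (String × Int)) : Option Int :=
  let items := (PySem.Dict.ofList ratings).items
  let n := normalizar nombre
  match buscarExact n items with
  | some r => some r
  | none =>
    match buscarSub n items with
    | some r => some r
    | none => none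

-- ===== PORT B =====
-- single pass: return on exact match, remember the first substring candidate in 'cand'
def scanB (n : String) (cand : Option Int) : List (String × Int) → Option Int
  | [] => cand
  | (eq, r) :: rest =>
      let m := normalizar eq
      if m = n then some r
      else if cand = none ∧ (PySem.Str.isIn n m || PySem.Str.isIn m n) then scanB n (some r) rest
      else scanB n cand rest

def buscar_rating_alt (nombre : String) (ratings : List (String × Int)) : Option Int :=
  let n := normalizar nombre
  scanB n none (PySem.Dict.ofList ratings).items

-- ===== PRECONDITION & SPEC =====
def Spec_buscar_rating (nombre : String) (ratings : List (String × Int)) (out : Option Int) : Prop := out = buscar_rating_alt nombre ratings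
instance (nombre : String) (ratings : List (String × Int)) (out : Option Int) : Decidable (Spec_buscar_rating nombre ratings out) := by unfold Spec_buscar_rating; infer_instance

-- ===== CLAIM (what is proved, stated in full; the proofs are below) =====
def Claim_equal_buscar_rating : Prop := ∀ (nombre : String) (ratings : List (String × Int)), Dom_buscar_rating nombre ratings → Spec_buscar_rating nombre ratings (buscar_rating nombre ratings)

-- ===== LEMMAS AND PROOFS =====

-- with a candidate already saved, the scan returns the first exact match, else the candidate
lemma scanB_some (n : String) (c : Int) (items : List (String × Int)) :
    scanB n (some c) items = match buscarExact n items with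
      | some r => some r
      | none => some c := by
  induction items with
  | nil => simp [scanB, buscarExact]
  | cons p rest ih =>
    obtain ⟨eq, r⟩ := p
    by_cases h : normalizar eq = n
    · simp [scanB, buscarExact, h]
    · simp [scanB, buscarExact, h, ih]

-- with no candidate yet, the scan returns the first exact match, else A's second pass
lemma scanB_none (n : String) (items : List (String × Int)) :
    scanB n none items = match buscarExact n items with
      | some r => some r
      | none => match buscarSub n items with
        | some r => some r
        | none => none := by
  induction items with
  | nil => simp [scanB, buscarExact, buscarSub]
  | cons p rest ih =>
    obtain ⟨eq, r⟩ := p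
    by_cases h : normalizar eq = n
    · simp [scanB, buscarExact, buscarSub, h]
    · by_cases hs : PySem.Chars.isIn n.toList (normalizar eq).toList = true ∨ PySem.Chars.isIn (normalizar eq).toList n.toList = true
      · simp [scanB, buscarExact, buscarSub, h, hs, scanB_some]
      · simp [scanB, buscarExact, buscarSub, h, hs, ih]

-- ===== VERDICT (by name: the statement is the Claim_ definition above) =====
theorem buscar_rating_spec : Claim_equal_buscar_rating := by
  intro nombre ratings _
  unfold Spec_buscar_rating buscar_rating buscar_rating_alt
  rw [scanB_none]
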